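-- pv_equiv track=rewrite | github.com/Hazperera/Bioinformatics_II | Week1/1.3 Genome_Path_Problem/genomePath.py | startingKmer
-- ===== SOURCE A (Python) =====
-- def startingKmer( kmers ) :
--     prefixes = list()
--     suffixes = list()
--     starter = ""
--
--     for kmer in kmers :
--         prefix = kmer[:-1]
--         suffix = kmer[1:]
--
--         prefixes.append( prefix )
--         suffixes.append( suffix )
--
--     for suff in suffixes :
--         if suff in prefixes :
--             prefixes.remove(suff)
--
--     for kmer in kmers :
--         if ''.join(prefixes) in kmer :
--             starter = kmer
--
--     return starter
-- ===== SOURCE B (Python) =====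
-- def startingKmer(kmers):
--     # Group prefix occurrences into per-value position lists; per value, drop
--     # as many leading positions as that value occurs among suffixes; the
--     # survivors sorted by position are the uncancelled prefixes in order.
--     positions = {}
--     suffix_count = {}
--     for i, kmer in enumerate(kmers):
--         p = kmer[:-1]
--         s = kmer[1:]
--         positions[p] = positions.get(p, []) + [i]
--         suffix_count[s] = suffix_count.get(s, 0) + 1
--     surviving = []
--     for value, idxs in positions.items():
--         for i in idxs[suffix_count.get(value, 0):]:
--             surviving.append((i, value))
--     surviving.sort(key=lambda t: t[0])
--     target = ''.join(v for _, v in surviving)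
--     for kmer in reversed(kmers):
--         if target in kmer:
--             return kmer
--     return ""
-- ===== Notes on version B (the rewrite author's own statement) =====
-- stated objective: faster
-- what changed: Instead of repeatedly scanning/removing from the prefix list, B groups prefix occurrences into per-value position lists in one pass, drops per value as many leading positions as the suffix multiplicity, sorts the surviving (position,value) pairs by position, and returns the first match scanning the kmers from the back.
import Mathlib
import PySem

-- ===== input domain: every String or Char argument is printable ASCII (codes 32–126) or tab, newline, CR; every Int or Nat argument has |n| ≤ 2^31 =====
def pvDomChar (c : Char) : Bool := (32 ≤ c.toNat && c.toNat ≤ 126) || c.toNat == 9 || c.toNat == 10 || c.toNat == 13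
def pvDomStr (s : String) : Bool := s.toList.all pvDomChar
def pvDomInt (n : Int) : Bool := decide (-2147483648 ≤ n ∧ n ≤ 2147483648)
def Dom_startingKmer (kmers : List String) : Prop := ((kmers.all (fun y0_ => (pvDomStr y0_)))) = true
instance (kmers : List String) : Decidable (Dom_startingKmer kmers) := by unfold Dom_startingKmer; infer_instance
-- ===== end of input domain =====

-- B groups prefix occurrences into per-value position lists, drops per value as many
-- leading positions as the suffix multiplicity, sorts survivors by position and scans
-- the kmers from the back; same return value on every input.

-- ===== PORT A =====
def startingKmer (kmers : List String) : String :=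
  -- first loop: build prefixes and suffixes
  let ps := kmers.foldl
    (fun acc kmer =>
      (acc.1 ++ [PySem.Str.slice kmer none (some (-1))],
       acc.2 ++ [PySem.Str.slice kmer (some 1) none]))
    ([], [])
  -- second loop: for suff in suffixes: if suff in prefixes: prefixes.remove(suff)
  let prefixes := ps.2.foldl
    (fun prefs suff =>
      if prefs.contains suff then (PySem.List.remove? prefs suff).getD prefs else prefs)
    ps.1
  -- third loop: keep the last kmer containing ''.join(prefixes)
  kmers.foldl
    (fun starter kmer =>
      if PySem.Str.isIn (PySem.Str.join "" prefixes) kmer then kmer else starter)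
    ""

-- ===== PORT B =====
-- for kmer in reversed(kmers): if target in kmer: return kmer / return ""
def pvFindFromBack (t : String) : List String → String
  | [] => ""
  | k :: ks => if PySem.Str.isIn t k then k else pvFindFromBack t ks

def startingKmer_alt (kmers : List String) : String :=
  -- one pass: positions[p] = positions.get(p, []) + [i]; suffix_count[s] += 1
  let st := (PySem.List.enumerate kmers 0).foldl
    (fun (acc : PySem.Dict String (List Int) × PySem.Dict String Int) p =>
      (acc.1.modify (PySem.Str.slice p.2 none (some (-1))) [] (· ++ [p.1]),
       acc.2.modify (PySem.Str.slice p.2 (some 1) none) 0 (· + 1)))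
    (PySem.Dict.empty, PySem.Dict.empty)
  -- for value, idxs in positions.items(): surviving += pairs from idxs[suffix_count.get(value,0):]
  let surviving := st.1.items.foldl
    (fun (acc : List (Int × String)) it =>
      acc ++ (PySem.List.slice it.2 (some (st.2.getD it.1 0)) none).map (fun i => (i, it.1)))
    []
  -- surviving.sort(key=lambda t: t[0])
  let sortedSurv := PySem.List.sorted surviving (fun t => t.1) false
  let target := PySem.Str.join "" (sortedSurv.map (fun t => t.2))
  pvFindFromBack target kmers.reverse

-- ===== PRECONDITION & SPEC =====
def Spec_startingKmer (kmers : List String) (out : String) : Prop := out = startingKmer_alt kmers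
instance (kmers : List String) (out : String) : Decidable (Spec_startingKmer kmers out) := by unfold Spec_startingKmer; infer_instance

-- ===== CLAIM (what is proved, stated in full; the proofs are below) =====
def Claim_equal_startingKmer : Prop := ∀ (kmers : List String), Dom_startingKmer kmers → Spec_startingKmer kmers (startingKmer kmers)

-- ===== LEMMAS AND PROOFS =====

-- canonical form of the "remaining prefixes": skip, for each value, as many
-- occurrences (from the front) as the counter c grants
def pvSkipC : List String → (String → Int) → List String
  | [], _ => []
  | p :: P, c =>
    if 0 < c p then pvSkipC P (fun v => if v = p then c v - 1 else c v)
    else p :: pvSkipC P c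

-- the same skipping loop on (position, value) pairs, driven by the value
def pvSkipCP : List (Int × String) → (String → Int) → List (Int × String)
  | [], _ => []
  | q :: Q, c =>
    if 0 < c q.2 then pvSkipCP Q (fun v => if v = q.2 then c v - 1 else c v)
    else q :: pvSkipCP Q c

-- A's guarded remove-loop is List.diff
theorem pvFoldRemove_eq_diff : ∀ (S P : List String),
    S.foldl (fun prefs suff =>
      if prefs.contains suff then (PySem.List.remove? prefs suff).getD prefs else prefs) P
    = P.diff S := by
  intro S
  induction S with
  | nil => intro P; simp [List.foldl]
  | cons s S ih =>
    intro P
    have hstep : (if P.contains s then (PySem.List.remove? P s).getD P else P) = P.erase s := by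
      by_cases h : s ∈ P
      · rw [if_pos (List.contains_iff_mem.mpr h), PySem.List.remove?_eq_some_erase P s h]
        rfl
      · rw [if_neg (by simpa using h), List.erase_of_not_mem h]
    simp only [List.foldl_cons, hstep, ih, List.diff_cons]

-- List.diff is pvSkipC with the count function of S
theorem pvDiff_eq_skipC : ∀ (P S : List String),
    P.diff S = pvSkipC P (fun v => (S.count v : Int)) := by
  intro P
  induction P with
  | nil => intro S; simp [pvSkipC, List.nil_diff]
  | cons p P ih =>
    intro S
    by_cases h : p ∈ S
    · have hc : 0 < S.count p := List.count_pos_iff.mpr h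
      have hfun : (fun v => ((S.erase p).count v : Int))
          = (fun v => if v = p then (S.count v : Int) - 1 else (S.count v : Int)) := by
        funext v
        by_cases hv : v = p
        · subst hv
          rw [List.count_erase_self]
          simp
          omega
        · rw [List.count_erase_of_ne hv]
          simp [hv]
      rw [List.cons_diff]
      simp only [h, if_pos, pvSkipC]
      rw [if_pos (by exact_mod_cast hc), ih, hfun]
    · have hc : S.count p = 0 := List.count_eq_zero.mpr h
      rw [List.cons_diff, if_neg h]
      simp only [pvSkipC, hc, Nat.cast_zero, lt_self_iff_false, if_false]
      rw [ih]

-- the pair-building loop of A is the two maps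
theorem pvPairFold_eq (kmers : List String) :
    kmers.foldl
      (fun (acc : List String × List String) kmer =>
        (acc.1 ++ [PySem.Str.slice kmer none (some (-1))],
         acc.2 ++ [PySem.Str.slice kmer (some 1) none]))
      ([], [])
    = (kmers.map (fun k => PySem.Str.slice k none (some (-1))),
       kmers.map (fun k => PySem.Str.slice k (some 1) none)) := by
  rw [PySem.List.foldl_prod_mk
      (f := fun a e => a ++ [PySem.Str.slice e none (some (-1))])
      (g := fun a e => a ++ [PySem.Str.slice e (some 1) none])]
  rw [PySem.List.foldl_append_singleton_eq_map, PySem.List.foldl_append_singleton_eq_map]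
  simp

-- last-match foldl = first match of the reverse, with accumulator
def pvFFAcc (t : String) : List String → String → String
  | [], acc => acc
  | k :: ks, acc => if PySem.Str.isIn t k then k else pvFFAcc t ks acc

theorem pvFFAcc_append (t : String) : ∀ (xs : List String) (k : String) (acc : String),
    pvFFAcc t (xs ++ [k]) acc = pvFFAcc t xs (if PySem.Str.isIn t k then k else acc) := by
  intro xs
  induction xs with
  | nil => intro k acc; simp [pvFFAcc]
  | cons x xs ih =>
    intro k acc
    simp only [List.cons_append, pvFFAcc, ih]

theorem pvFoldLast_eq_ffAcc (t : String) : ∀ (L : List String) (acc : String),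
    L.foldl (fun st k => if PySem.Str.isIn t k then k else st) acc
    = pvFFAcc t L.reverse acc := by
  intro L
  induction L with
  | nil => intro acc; simp [pvFFAcc]
  | cons k L ih =>
    intro acc
    simp only [List.foldl_cons, ih, List.reverse_cons, pvFFAcc_append]

theorem pvFindFromBack_eq_ffAcc (t : String) : ∀ (R : List String),
    pvFindFromBack t R = pvFFAcc t R "" := by
  intro R
  induction R with
  | nil => rfl
  | cons k R ih => simp only [pvFindFromBack, pvFFAcc, ih]

-- pvSkipCP projects to pvSkipC on the values
theorem pvSkipCP_map_snd : ∀ (Q : List (Int × String)) (c : String → Int),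
    (pvSkipCP Q c).map (·.2) = pvSkipC (Q.map (·.2)) c := by
  intro Q
  induction Q with
  | nil => intro c; simp [pvSkipCP, pvSkipC]
  | cons q Q ih =>
    intro c
    simp only [List.map_cons, pvSkipCP, pvSkipC]
    by_cases h : 0 < c q.2
    · rw [if_pos h, if_pos h, ih]
    · rw [if_neg h, if_neg h, List.map_cons, ih]

theorem pvSkipCP_sublist : ∀ (Q : List (Int × String)) (c : String → Int),
    (pvSkipCP Q c).Sublist Q := by
  intro Q
  induction Q with
  | nil => intro c; simp [pvSkipCP]
  | cons q Q ih =>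
    intro c
    simp only [pvSkipCP]
    by_cases h : 0 < c q.2
    · rw [if_pos h]; exact (ih _).cons q
    · rw [if_neg h]; exact (ih _).cons₂ q

-- per-value restriction of pvSkipCP is a drop of the per-value restriction
theorem pvSkipCP_filter : ∀ (Q : List (Int × String)) (c : String → Int) (v : String),
    (pvSkipCP Q c).filter (fun q => q.2 == v)
    = ((Q.filter (fun q => q.2 == v)).drop (c v).toNat) := by
  intro Q
  induction Q with
  | nil => intro c v; simp [pvSkipCP]
  | cons q Q ih =>
    intro c v
    simp only [pvSkipCP]
    by_cases h : 0 < c q.2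
    · rw [if_pos h]
      by_cases hv : q.2 = v
      · subst hv
        rw [List.filter_cons_of_pos (by simp), ih, if_pos rfl]
        have hn : (c q.2).toNat = (c q.2 - 1).toNat + 1 := by omega
        rw [hn, List.drop_succ_cons]
      · rw [List.filter_cons_of_neg (by simpa using hv), ih,
          if_neg (fun h' : v = q.2 => hv h'.symm)]
    · rw [if_neg h]
      by_cases hv : q.2 = v
      · subst hv
        have h0 : (c q.2).toNat = 0 := by omega
        rw [List.filter_cons_of_pos (by simp), List.filter_cons_of_pos (by simp), ih, h0]
        simp
      · rw [List.filter_cons_of_neg (by simpa using hv), List.filter_cons_of_neg (by simpa using hv), ih]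

-- concatenating per-value restrictions over a Nodup value cover is a permutation
theorem pvFlatMapFilter_perm : ∀ (K : List String) (l : List (Int × String)),
    K.Nodup → (∀ q ∈ l, q.2 ∈ K) →
    (K.flatMap (fun v => l.filter (fun q => q.2 == v))).Perm l := by
  intro K
  induction K with
  | nil =>
    intro l _ hcov
    cases l with
    | nil => simp
    | cons q l => exact absurd (hcov q (by simp)) (by simp)
  | cons v K ih =>
    intro l hnd hcov
    simp only [List.flatMap_cons]
    have hnv : v ∉ K := (List.nodup_cons.mp hnd).1
    have hmap : K.map (fun w => l.filter (fun q => q.2 == w))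
        = K.map (fun w => (l.filter (fun q => !(q.2 == v))).filter (fun q => q.2 == w)) := by
      apply List.map_congr_left
      intro w hw
      rw [List.filter_filter]
      apply List.filter_congr
      intro q hq
      by_cases hqv : q.2 = w
      · have hwv : ¬ w = v := fun hc => hnv (hc ▸ hw)
        simp [hqv, hwv]
      · simp [hqv]
    have hcov' : ∀ q ∈ l.filter (fun q => !(q.2 == v)), q.2 ∈ K := by
      intro q hq
      have hm := List.mem_of_mem_filter hq
      have hp := List.of_mem_filter hq
      simp only [Bool.not_eq_true', beq_eq_false_iff_ne, ne_eq] at hp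
      rcases List.mem_cons.mp (hcov q hm) with h | h
      · exact absurd h hp
      · exact h
    rw [List.flatMap_def, hmap, ← List.flatMap_def]
    exact (List.Perm.append_left _ (ih _ (List.nodup_cons.mp hnd).2 hcov')).trans
      (List.filter_append_perm (fun q => q.2 == v) l)

-- Pairwise strictly increasing positions survive sublisting
theorem pvSkipCP_pairwise (kmers : List String) (c : String → Int) :
    (pvSkipCP ((PySem.List.enumerate kmers 0).map
        (fun p => (p.1, PySem.Str.slice p.2 none (some (-1))))) c).Pairwise
      (fun a b => a.1 < b.1) := by
  apply List.Pairwise.sublist (pvSkipCP_sublist _ c)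
  rw [List.pairwise_map]
  exact PySem.List.pairwise_lt_enumerate kmers 0

-- a list all of whose values are v is rebuilt from its positions
theorem pvMapFstPair (v : String) : ∀ (l : List (Int × String)), (∀ q ∈ l, q.2 = v) →
    (l.map (fun q => q.1)).map (fun i => (i, v)) = l := by
  intro l h
  rw [List.map_map]
  conv_rhs => rw [← List.map_id l]
  apply List.map_congr_left
  intro q hq
  simp [← h q hq]

-- B's counter dict returns the suffix multiplicities
theorem pvScD_getD (kmers : List String) (v : String) :
    ((PySem.List.enumerate kmers 0).foldl
        (fun (d : PySem.Dict String Int) p =>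
          d.modify (PySem.Str.slice p.2 (some 1) none) 0 (· + 1)) PySem.Dict.empty).getD v 0
    = ((kmers.map (fun k => PySem.Str.slice k (some 1) none)).count v : Int) := by
  rw [← List.foldl_map (f := fun p : Int × String => PySem.Str.slice p.2 (some 1) none)
      (g := fun (d : PySem.Dict String Int) x => d.modify x 0 (· + 1))]
  have hm : (PySem.List.enumerate kmers 0).map (fun p => PySem.Str.slice p.2 (some 1) none)
      = kmers.map (fun k => PySem.Str.slice k (some 1) none) := by
    conv_rhs => rw [← PySem.List.map_snd_enumerate (xs := kmers) (s := 0)]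
    rw [List.map_map]
    rfl
  rw [hm, PySem.Dict.getD_foldl_modify_add_one, PySem.Dict.getD_empty]
  simp

-- B's grouping dict returns, per value, the positions of that value's occurrences
theorem pvPosD_getD (kmers : List String) (v : String) :
    ((PySem.List.enumerate kmers 0).foldl
        (fun (d : PySem.Dict String (List Int)) p =>
          d.modify (PySem.Str.slice p.2 none (some (-1))) [] (· ++ [p.1])) PySem.Dict.empty).getD v []
    = (((PySem.List.enumerate kmers 0).map
          (fun p => (p.1, PySem.Str.slice p.2 none (some (-1))))).filter
        (fun q => q.2 == v)).map (fun q => q.1) := by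
  rw [← List.foldl_map (f := fun p : Int × String => (PySem.Str.slice p.2 none (some (-1)), p.1))
      (g := fun (d : PySem.Dict String (List Int)) q => d.modify q.1 [] (· ++ [q.2]))]
  rw [PySem.Dict.getD_foldl_modify_append, PySem.Dict.getD_empty]
  rw [List.filter_map, List.filter_map, List.map_map, List.map_map]
  rfl

-- B's grouping dict lists exactly the distinct prefixes, in first-occurrence order
theorem pvPosD_keys (kmers : List String) :
    ((PySem.List.enumerate kmers 0).foldl
        (fun (d : PySem.Dict String (List Int)) p =>
          d.modify (PySem.Str.slice p.2 none (some (-1))) [] (· ++ [p.1])) PySem.Dict.empty).keys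
    = PySem.Set.ofList (kmers.map (fun k => PySem.Str.slice k none (some (-1)))) := by
  rw [PySem.Dict.keys_foldl_modify_key (PySem.List.enumerate kmers 0)
      (fun p : Int × String => PySem.Str.slice p.2 none (some (-1))) []
      (fun _ p l => l ++ [p.1]) PySem.Dict.empty]
  rw [PySem.Dict.keys_empty, PySem.Set.update_nil_left]
  congr 1
  conv_rhs => rw [← PySem.List.map_snd_enumerate (xs := kmers) (s := 0)]
  rw [List.map_map]
  rfl

-- F's values are the prefixes
theorem pvF_map_snd (kmers : List String) :
    (((PySem.List.enumerate kmers 0).map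
        (fun p => (p.1, PySem.Str.slice p.2 none (some (-1))))).map (fun q => q.2))
    = kmers.map (fun k => PySem.Str.slice k none (some (-1))) := by
  conv_rhs => rw [← PySem.List.map_snd_enumerate (xs := kmers) (s := 0)]
  rw [List.map_map, List.map_map]
  rfl

-- ===== VERDICT (by name: the statement is the Claim_ definition above) =====
theorem startingKmer_spec : Claim_equal_startingKmer := by
  intro kmers _
  unfold Spec_startingKmer startingKmer startingKmer_alt
  simp only [pvPairFold_eq, pvFoldRemove_eq_diff, pvDiff_eq_skipC, pvFoldLast_eq_ffAcc,
    pvFindFromBack_eq_ffAcc,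
    PySem.List.foldl_prod_mk
      (fun (d : PySem.Dict String (List Int)) (p : Int × String) =>
        d.modify (PySem.Str.slice p.2 none (some (-1))) [] (· ++ [p.1]))
      (fun (d : PySem.Dict String Int) (p : Int × String) =>
        d.modify (PySem.Str.slice p.2 (some 1) none) 0 (· + 1))]
  set posD := List.foldl
      (fun (d : PySem.Dict String (List Int)) (p : Int × String) =>
        d.modify (PySem.Str.slice p.2 none (some (-1))) [] fun x => x ++ [p.1])
      PySem.Dict.empty (PySem.List.enumerate kmers) with hposD
  set scD := List.foldl
      (fun (d : PySem.Dict String Int) (p : Int × String) =>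
        d.modify (PySem.Str.slice p.2 (some 1) none) 0 fun x => x + 1)
      PySem.Dict.empty (PySem.List.enumerate kmers) with hscD
  set P := kmers.map (fun k => PySem.Str.slice k none (some (-1))) with hP
  set S := kmers.map (fun k => PySem.Str.slice k (some 1) none) with hS
  set F := (PySem.List.enumerate kmers 0).map
      (fun p => (p.1, PySem.Str.slice p.2 none (some (-1)))) with hF
  set K := PySem.Set.ofList P with hK
  set c := fun v => ((S.count v : Int)) with hc
  -- keys of the grouping dict
  have hkeys : posD.keys = K := by rw [hposD, hK, hP]; exact pvPosD_keys kmers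
  have hnd : posD.keys.Nodup := by rw [hkeys, hK]; exact PySem.Set.nodup_ofList P
  have hitems : posD.items = K.map (fun k => (k, posD.getD k [])) := by
    rw [PySem.Dict.items_eq_map_keys posD hnd [], hkeys]
  -- the surviving list is the per-value concatenation of pvSkipCP's restrictions
  have hsurv : posD.items.foldl
      (fun (acc : List (Int × String)) it =>
        acc ++ (PySem.List.slice it.2 (some (scD.getD it.1 0)) none).map (fun i => (i, it.1)))
      []
      = K.flatMap (fun v => (pvSkipCP F c).filter (fun q => q.2 == v)) := by
    rw [hitems, PySem.List.foldl_append_eq_flatMap, List.nil_append, List.flatMap_map]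
    rw [List.flatMap_def, List.flatMap_def]
    congr 1
    apply List.map_congr_left
    intro v _
    have hgd : scD.getD v 0 = (S.count v : Int) := by rw [hscD, hS]; exact pvScD_getD kmers v
    have hpd : posD.getD v [] = (F.filter (fun q => q.2 == v)).map (fun q => q.1) := by
      rw [hposD, hF]; exact pvPosD_getD kmers v
    rw [hgd, hpd, PySem.List.slice_from_natCast, ← List.map_drop]
    have hmem : ∀ q ∈ (F.filter (fun q => q.2 == v)).drop (S.count v), q.2 = v := by
      intro q hq
      have := List.of_mem_filter (List.mem_of_mem_drop hq)
      simpa using this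
    rw [pvMapFstPair v _ hmem, pvSkipCP_filter, hc]
    simp
  -- the sort by position undoes the per-value grouping
  have hcover : ∀ q ∈ pvSkipCP F c, q.2 ∈ K := by
    intro q hq
    have hqF : q ∈ F := (pvSkipCP_sublist F c).subset hq
    have : q.2 ∈ F.map (fun q => q.2) := List.mem_map_of_mem hqF
    rw [hF, pvF_map_snd, ← hP] at this
    rw [hK]
    exact (PySem.Set.mem_ofList P q.2).mpr this
  have hperm : (pvSkipCP F c).Perm (K.flatMap (fun v => (pvSkipCP F c).filter (fun q => q.2 == v))) :=
    (pvFlatMapFilter_perm K (pvSkipCP F c) (hK ▸ PySem.Set.nodup_ofList P) hcover).symm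
  have hpw : (pvSkipCP F c).Pairwise (fun a b => a.1 < b.1) := by
    rw [hF]; exact pvSkipCP_pairwise kmers c
  have hsorted : PySem.List.sorted
      (K.flatMap (fun v => (pvSkipCP F c).filter (fun q => q.2 == v))) (fun t => t.1)
      = pvSkipCP F c :=
    PySem.List.sorted_eq_of_perm_of_pairwise_lt _ _ _ hperm hpw
  rw [hsurv, hsorted, pvSkipCP_map_snd]
  rw [hF, pvF_map_snd, ← hP]
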